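-- pv_equiv track=rewrite | github.com/leozzmc/AetherNet | aether_phase6_runtime/adaptive.py | _apply_conservative
-- ===== SOURCE A (Python) =====
-- from typing import List, Optional
--
-- def _apply_conservative(
--     safe_candidates: List[str],
--     decision_map: dict[str, str],
-- ) -> List[str]:
--     preferred = [
--         link_id
--         for link_id in safe_candidates
--         if decision_map.get(link_id, "allowed") == "preferred"
--     ]
--
--     if preferred:
--         return preferred
--
--     return [
--         link_id
--         for link_id in safe_candidates
--         if decision_map.get(link_id, "allowed") != "avoid"
--     ]
-- ===== SOURCE B (Python) =====
-- from typing import List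
--
-- def _apply_conservative(
--     safe_candidates: List[str],
--     decision_map: dict[str, str],
-- ) -> List[str]:
--     # Single backward scan with a mode switch: collect non-avoid ids until a
--     # preferred id appears; from then on keep only preferred ids. Reverse once.
--     found = False
--     acc = []
--     for link_id in reversed(safe_candidates):
--         d = decision_map.get(link_id, "allowed")
--         if d == "preferred":
--             if found:
--                 acc.append(link_id)
--             else:
--                 found = True
--                 acc = [link_id]
--         elif not found and d != "avoid":
--             acc.append(link_id)
--     acc.reverse()
--     return acc
-- ===== Notes on version B (the rewrite author's own statement) =====
-- stated objective: alternative
-- what changed: Replaced A's two forward filter passes plus non-empty test by a single backward scan with a mode switch: while no preferred id has been seen it collects non-avoid ids, on the first preferred id it discards the accumulator and thereafter keeps only preferred ids, reversing once at the end.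
import Mathlib
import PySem

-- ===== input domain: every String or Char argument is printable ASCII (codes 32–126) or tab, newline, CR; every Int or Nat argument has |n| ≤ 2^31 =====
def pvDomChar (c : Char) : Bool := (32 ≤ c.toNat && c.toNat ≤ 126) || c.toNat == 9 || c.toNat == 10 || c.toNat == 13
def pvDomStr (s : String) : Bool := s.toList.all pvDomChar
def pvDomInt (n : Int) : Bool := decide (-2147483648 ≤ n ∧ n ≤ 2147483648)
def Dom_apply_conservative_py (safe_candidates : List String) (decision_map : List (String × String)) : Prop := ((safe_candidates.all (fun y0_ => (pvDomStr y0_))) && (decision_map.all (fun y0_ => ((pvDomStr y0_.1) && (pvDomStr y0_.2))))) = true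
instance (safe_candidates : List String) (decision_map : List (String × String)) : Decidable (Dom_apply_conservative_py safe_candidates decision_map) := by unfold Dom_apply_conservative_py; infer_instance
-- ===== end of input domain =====

-- B replaces A's two forward filter passes by ONE backward scan with a mode switch; objective: alternative (same cost).

-- ===== PORT A =====
def apply_conservative_py (safe_candidates : List String) (decision_map : List (String × String)) : List String :=
  let preferred := safe_candidates.filter
    (fun link_id => PySem.Dict.getD (PySem.Dict.mk decision_map) link_id "allowed" == "preferred")
  if preferred ≠ [] then preferred
  else safe_candidates.filter
    (fun link_id => PySem.Dict.getD (PySem.Dict.mk decision_map) link_id "allowed" != "avoid")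

-- ===== PORT B =====
def apply_conservative_py_alt (safe_candidates : List String) (decision_map : List (String × String)) : List String :=
  let st := (safe_candidates.reverse).foldl
    (fun (acc : Bool × List String) link_id =>
      let d := PySem.Dict.getD (PySem.Dict.mk decision_map) link_id "allowed"
      if d == "preferred" then
        if acc.1 then (true, acc.2 ++ [link_id]) else (true, [link_id])
      else if !acc.1 && d != "avoid" then (acc.1, acc.2 ++ [link_id])
      else acc)
    (false, [])
  st.2.reverse

-- ===== PRECONDITION & SPEC =====
def Spec_apply_conservative_py (safe_candidates : List String) (decision_map : List (String × String)) (out : List String) : Prop := out = apply_conservative_py_alt safe_candidates decision_map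
instance (safe_candidates : List String) (decision_map : List (String × String)) (out : List String) : Decidable (Spec_apply_conservative_py safe_candidates decision_map out) := by unfold Spec_apply_conservative_py; infer_instance

-- ===== CLAIM (what is proved, stated in full; the proofs are below) =====
def Claim_equal_apply_conservative_py : Prop := ∀ (safe_candidates : List String) (decision_map : List (String × String)), Dom_apply_conservative_py safe_candidates decision_map → Spec_apply_conservative_py safe_candidates decision_map (apply_conservative_py safe_candidates decision_map)

-- ===== LEMMAS AND PROOFS =====

-- characterisation of B's backward fold: via foldr, the state is (whether a
-- preferred id occurs in xs, the reverse of the corresponding filter of xs)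
theorem fold_state_eq (dm : List (String × String)) (xs : List String) :
    xs.foldr
      (fun link_id (acc : Bool × List String) =>
        let d := PySem.Dict.getD (PySem.Dict.mk dm) link_id "allowed"
        if d == "preferred" then
          if acc.1 then (true, acc.2 ++ [link_id]) else (true, [link_id])
        else if !acc.1 && d != "avoid" then (acc.1, acc.2 ++ [link_id])
        else acc)
      (false, [])
    = (if xs.filter (fun l => PySem.Dict.getD (PySem.Dict.mk dm) l "allowed" == "preferred") ≠ []
       then (true, (xs.filter (fun l => PySem.Dict.getD (PySem.Dict.mk dm) l "allowed" == "preferred")).reverse)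
       else (false, (xs.filter (fun l => PySem.Dict.getD (PySem.Dict.mk dm) l "allowed" != "avoid")).reverse)) := by
  induction xs with
  | nil => simp
  | cons x xs ih =>
    simp only [List.foldr_cons, ih, List.filter_cons]
    by_cases hp : PySem.Dict.getD (PySem.Dict.mk dm) x "allowed" == "preferred" <;>
      by_cases ha : PySem.Dict.getD (PySem.Dict.mk dm) x "allowed" != "avoid" <;>
        by_cases hf : xs.filter (fun l => PySem.Dict.getD (PySem.Dict.mk dm) l "allowed" == "preferred") ≠ [] <;>
          simp_all

-- ===== VERDICT (by name: the statement is the Claim_ definition above) =====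
theorem apply_conservative_py_spec : Claim_equal_apply_conservative_py := by
  intro sc dm _
  show apply_conservative_py sc dm = apply_conservative_py_alt sc dm
  simp only [apply_conservative_py, apply_conservative_py_alt, List.foldl_reverse]
  rw [fold_state_eq]
  by_cases hf : sc.filter (fun l => PySem.Dict.getD (PySem.Dict.mk dm) l "allowed" == "preferred") ≠ [] <;>
    simp [hf]
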